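-- pv_equiv track=rewrite | github.com/jdolivet/Programmation | Python/Artificial Intelligence/Project 4 - Constraint Satisfaction Problems/driver_3.py | isConsistantListe
-- ===== SOURCE A (Python) =====
-- def isConsistantListe(liste):
--     newList = []
--     for elt in liste:
--         if elt != 0:
--             newList.append(elt)
--     if len(newList) == len(set(newList)):
--         return True
--     else:
--         return False
-- ===== SOURCE B (Python) =====
-- def isConsistantListe(liste):
--     seen = set()
--     for elt in liste:
--         if elt != 0:
--             if elt in seen:
--                 return False
--             seen.add(elt)
--     return True
-- ===== Notes on version B (the rewrite author's own statement) =====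
-- stated objective: simpler
-- what changed: Replaces the build-a-filtered-list-then-compare-its-length-with-set(...) strategy by a single incremental pass that keeps a 'seen' set and returns False at the first repeated non-zero element.
import Mathlib
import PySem

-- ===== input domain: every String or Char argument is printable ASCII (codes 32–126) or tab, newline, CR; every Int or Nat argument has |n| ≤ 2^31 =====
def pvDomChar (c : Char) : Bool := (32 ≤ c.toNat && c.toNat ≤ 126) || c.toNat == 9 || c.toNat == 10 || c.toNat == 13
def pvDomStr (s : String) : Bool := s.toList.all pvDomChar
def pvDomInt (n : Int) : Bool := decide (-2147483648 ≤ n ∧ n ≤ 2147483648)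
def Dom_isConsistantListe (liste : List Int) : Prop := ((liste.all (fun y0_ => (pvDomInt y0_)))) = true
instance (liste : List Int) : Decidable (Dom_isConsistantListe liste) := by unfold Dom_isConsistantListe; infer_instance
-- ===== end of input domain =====

-- B replaces A's build-filtered-list-then-compare-with-set-length by one pass with a 'seen' set and early exit (objective: simpler).

-- ===== PORT A =====
def isConsistantListe (liste : List Int) : Bool :=
  let newList := liste.foldl (fun acc elt => if elt != 0 then acc ++ [elt] else acc) []
  if newList.length = (PySem.Set.ofList newList).length then true else false

-- ===== PORT B =====
def isConsistantListeGo (seen : PySem.Set Int) : List Int → Bool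
  | [] => true
  | elt :: rest =>
    if elt != 0 then
      if PySem.Set.contains seen elt then false
      else isConsistantListeGo (PySem.Set.add seen elt) rest
    else isConsistantListeGo seen rest

def isConsistantListe_alt (liste : List Int) : Bool :=
  isConsistantListeGo PySem.Set.empty liste

-- ===== PRECONDITION & SPEC =====
def Spec_isConsistantListe (liste : List Int) (out : Bool) : Prop := out = isConsistantListe_alt liste
instance (liste : List Int) (out : Bool) : Decidable (Spec_isConsistantListe liste out) := by unfold Spec_isConsistantListe; infer_instance

-- ===== CLAIM (what is proved, stated in full; the proofs are below) =====
def Claim_equal_isConsistantListe : Prop := ∀ (liste : List Int), Dom_isConsistantListe liste → Spec_isConsistantListe liste (isConsistantListe liste)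

-- ===== LEMMAS AND PROOFS =====

-- A's accumulating loop builds the filtered list.
theorem pv_foldl_filter (l : List Int) (acc : List Int) :
    l.foldl (fun acc elt => if elt != 0 then acc ++ [elt] else acc) acc
      = acc ++ l.filter (fun e => e != 0) := by
  induction l generalizing acc with
  | nil => simp
  | cons x xs ih =>
    rw [List.foldl_cons, List.filter_cons]
    by_cases h : x = 0
    · rw [if_neg (by simp [h]), ih, if_neg (by simp [h])]
    · rw [if_pos (by simp [h]), ih, if_pos (by simp [h]), List.append_assoc]
      rfl

theorem pv_ofList_sublist (xs : List Int) : (PySem.Set.ofList xs).Sublist xs := by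
  induction xs with
  | nil => simp [PySem.Set.ofList_nil]
  | cons x xs ih =>
    rw [PySem.Set.ofList_cons]
    refine List.Sublist.cons₂ x (List.Sublist.trans ?_ ih)
    simp [PySem.Set.discard, List.filter_sublist]

-- A's length comparison decides Nodup of the filtered list.
theorem pv_A_eq (liste : List Int) :
    isConsistantListe liste = decide (liste.filter (fun e => e != 0)).Nodup := by
  unfold isConsistantListe
  rw [pv_foldl_filter]
  simp only [List.nil_append]
  set xs := liste.filter (fun e => e != 0) with hxs
  by_cases h : xs.Nodup
  · simp [PySem.Set.ofList_eq_self_of_nodup xs h, h]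
  · simp only [h, decide_false]
    rw [if_neg]
    intro hlen
    exact h (by
      have := (pv_ofList_sublist xs).eq_of_length hlen.symm
      rw [← this]; exact PySem.Set.nodup_ofList xs)

-- B's loop invariant.
theorem pv_go_iff (l : List Int) (seen : PySem.Set Int) :
    isConsistantListeGo seen l = true ↔
      ((l.filter (fun e => e != 0)).Nodup ∧
        ∀ x ∈ l.filter (fun e => e != 0), x ∉ seen) := by
  induction l generalizing seen with
  | nil => simp [isConsistantListeGo]
  | cons x xs ih =>
    by_cases h : x = 0
    · simp [isConsistantListeGo, h, ih]
    · rw [List.filter_cons, if_pos (by simp [h])]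
      show (if (x != 0) = true then _ else _) = true ↔ _
      rw [if_pos (by simp [h])]
      by_cases hm : x ∈ seen
      · rw [if_pos (by rw [(PySem.Set.contains_iff seen x)]; exact hm)]
        simp only [Bool.false_eq_true, false_iff, not_and]
        intro _ hall
        exact (hall x (by simp)) hm
      · rw [if_neg (by rw [(PySem.Set.contains_iff seen x)]; exact hm), ih]
        constructor
        · rintro ⟨hn, hall⟩
          have hx : x ∉ xs.filter (fun e => e != 0) := fun hx =>
            (hall x hx) (by rw [PySem.Set.mem_add]; right; rfl)
          exact ⟨List.nodup_cons.mpr ⟨hx, hn⟩, by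
            intro y hy
            rcases List.mem_cons.mp hy with rfl | hy
            · exact hm
            · exact fun hys => (hall y hy) (by rw [PySem.Set.mem_add]; left; exact hys)⟩
        · rintro ⟨hn, hall⟩
          rcases List.nodup_cons.mp hn with ⟨hx, hn⟩
          refine ⟨hn, ?_⟩
          intro y hy hya
          rcases (PySem.Set.mem_add seen x y).mp hya with hys | rfl
          · exact hall y (List.mem_cons_of_mem _ hy) hys
          · exact hx hy

-- ===== VERDICT (by name: the statement is the Claim_ definition above) =====
theorem isConsistantListe_spec : Claim_equal_isConsistantListe := by
  intro liste _
  show isConsistantListe liste = isConsistantListe_alt liste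
  rw [pv_A_eq]
  unfold isConsistantListe_alt
  by_cases h : (liste.filter (fun e => e != 0)).Nodup
  · rw [decide_eq_true h, eq_comm, pv_go_iff]
    exact ⟨h, fun x _ hx => by simp [PySem.Set.empty] at hx⟩
  · rw [decide_eq_false h]
    cases hg : isConsistantListeGo PySem.Set.empty liste
    · rfl
    · exact absurd ((pv_go_iff liste PySem.Set.empty).mp hg).1 h
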